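-- pv_equiv track=rewrite | github.com/CenterionIO/Resume_UI | backend/platforms/linkedin/parsers/linkedin_soup_parser.py | _looks_like_location
-- ===== SOURCE A (Python) =====
-- def _looks_like_location(text: str) -> bool:
--     """Check if text looks like a location"""
--     if not text or len(text) > 50:
--         return False
--
--     # Common location patterns
--     location_indicators = [
--         ', CA', ', NY', ', TX', ', WA', ', IL', ', MA', ', CO', ', GA',
--         ', FL', ', NC', ', VA', ', PA', ', OH', ', MI', ', NJ', ', AZ'
--     ]
--
--     return any(indicator in text for indicator in location_indicators)
-- ===== SOURCE B (Python) =====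
-- def _looks_like_location(text: str) -> bool:
--     """Check if text looks like a location"""
--     if not text or len(text) > 50:
--         return False
--
--     codes = {'CA', 'NY', 'TX', 'WA', 'IL', 'MA', 'CO', 'GA',
--              'FL', 'NC', 'VA', 'PA', 'OH', 'MI', 'NJ', 'AZ'}
--
--     # Scan suffixes once: a match is a comma-space separator followed by a known code.
--     s = text
--     while s:
--         if s.startswith(', ') and s[2:4] in codes:
--             return True
--         s = s[1:]
--     return False
-- ===== Notes on version B (the rewrite author's own statement) =====
-- stated objective: alternative
-- what changed: Instead of running 16 separate substring searches (one per comma-space-code indicator), B scans the text once for a comma-space separator and tests the following two characters against a set of state codes.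
import Mathlib
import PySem

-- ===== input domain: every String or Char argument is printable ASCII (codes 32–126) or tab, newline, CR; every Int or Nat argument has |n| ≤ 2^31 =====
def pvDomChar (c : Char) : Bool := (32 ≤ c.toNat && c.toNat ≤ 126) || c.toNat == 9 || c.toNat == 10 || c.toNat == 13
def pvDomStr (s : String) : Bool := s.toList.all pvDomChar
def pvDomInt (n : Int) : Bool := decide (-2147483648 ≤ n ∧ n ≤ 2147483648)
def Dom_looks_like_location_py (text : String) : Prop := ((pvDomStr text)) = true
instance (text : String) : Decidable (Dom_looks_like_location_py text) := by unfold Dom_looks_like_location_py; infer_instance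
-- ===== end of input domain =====

-- B scans the string once for a comma-space separator followed by a two-letter code from a set,
-- instead of A's 16 separate substring searches; objective: alternative (same observable result).

-- ===== PORT A =====
def pvIndicators : List String :=
  [", CA", ", NY", ", TX", ", WA", ", IL", ", MA", ", CO", ", GA",
   ", FL", ", NC", ", VA", ", PA", ", OH", ", MI", ", NJ", ", AZ"]

def looks_like_location_py (text : String) : Bool :=
  if text.toList.isEmpty || PySem.Str.len text > 50 then false
  else pvIndicators.any (fun ind => PySem.Str.isIn ind text)

-- ===== PORT B =====
def pvCodes : List (List Char) :=
  [['C','A'], ['N','Y'], ['T','X'], ['W','A'], ['I','L'], ['M','A'], ['C','O'], ['G','A'],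
   ['F','L'], ['N','C'], ['V','A'], ['P','A'], ['O','H'], ['M','I'], ['N','J'], ['A','Z']]

-- the 'while s: … s = s[1:]' loop of Source B; s[2:4] is PySem.Chars.slice
def pvScan : List Char → Bool
  | [] => false
  | c :: rest =>
      (PySem.Chars.startswith (c :: rest) [',', ' ']
         && pvCodes.contains (PySem.Chars.slice (c :: rest) (some 2) (some 4)))
      || pvScan rest

def looks_like_location_py_alt (text : String) : Bool :=
  if text.toList.isEmpty || PySem.Str.len text > 50 then false
  else pvScan text.toList

-- ===== PRECONDITION & SPEC =====
def Spec_looks_like_location_py (text : String) (out : Bool) : Prop := out = looks_like_location_py_alt text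
instance (text : String) (out : Bool) : Decidable (Spec_looks_like_location_py text out) := by unfold Spec_looks_like_location_py; infer_instance

-- ===== CLAIM (what is proved, stated in full; the proofs are below) =====
def Claim_equal_looks_like_location_py : Prop := ∀ (text : String), Dom_looks_like_location_py text → Spec_looks_like_location_py text (looks_like_location_py text)

-- ===== LEMMAS AND PROOFS =====

-- every code in pvCodes has length 2
lemma pvCodes_len {code : List Char} (h : code ∈ pvCodes) : code.length = 2 := by
  fin_cases h <;> rfl

lemma pvStep (s : List Char) :
    ((PySem.Chars.startswith s [',', ' ']
        && pvCodes.contains (PySem.Chars.slice s (some 2) (some 4))) = true)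
      ↔ ∃ code ∈ pvCodes, (',' :: ' ' :: code) <+: s := by
  rw [PySem.Chars.slice, PySem.List.slice_toNat s (by norm_num) (by norm_num)]
  simp only [Bool.and_eq_true, PySem.Chars.startswith, List.isPrefixOf_iff_prefix,
    List.contains_eq_mem, decide_eq_true_eq]
  constructor
  · rintro ⟨⟨t, ht⟩, hm⟩
    subst ht
    refine ⟨_, hm, ?_⟩
    show (',' :: ' ' :: List.take 2 t) <+: (',' :: ' ' :: t)
    exact List.cons_prefix_cons.2 ⟨rfl, List.cons_prefix_cons.2 ⟨rfl, List.take_prefix 2 t⟩⟩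
  · rintro ⟨code, hm, hp⟩
    have h2 := pvCodes_len hm
    obtain ⟨t, ht⟩ := hp
    subst ht
    refine ⟨⟨code ++ t, rfl⟩, ?_⟩
    show List.take 2 (code ++ t) ∈ pvCodes
    rw [← h2, List.take_left]
    exact hm

-- B's scan finds exactly the infix occurrences of ', XX' with XX a known code
lemma pvScan_iff (l : List Char) :
    pvScan l = true ↔ ∃ code ∈ pvCodes, (',' :: ' ' :: code) <:+: l := by
  induction l with
  | nil =>
      constructor
      · intro h; exact absurd h (by simp [pvScan])
      · rintro ⟨code, hm, hi⟩
        exact absurd (List.eq_nil_of_infix_nil hi) (by simp)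
  | cons c rest ih =>
      rw [pvScan, Bool.or_eq_true, ih, pvStep]
      constructor
      · rintro (⟨code, hm, hp⟩ | ⟨code, hm, hi⟩)
        · exact ⟨code, hm, hp.isInfix⟩
        · exact ⟨code, hm, (List.infix_cons_iff).2 (Or.inr hi)⟩
      · rintro ⟨code, hm, hi⟩
        rcases (List.infix_cons_iff).1 hi with hp | hi'
        · exact Or.inl ⟨code, hm, hp⟩
        · exact Or.inr ⟨code, hm, hi'⟩

lemma pvAny_iff (text : String) :
    (pvIndicators.any (fun ind => PySem.Str.isIn ind text) = true)
      ↔ ∃ code ∈ pvCodes, (',' :: ' ' :: code) <:+: text.toList := by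
  have hmap : pvIndicators.map String.toList = pvCodes.map (fun c => ',' :: ' ' :: c) := by rfl
  simp only [List.any_eq_true, PySem.Str.isIn_iff_infix]
  constructor
  · rintro ⟨ind, hm, hi⟩
    obtain ⟨code, hcm, hceq⟩ := List.mem_map.1 (hmap ▸ List.mem_map_of_mem (f := String.toList) hm)
    exact ⟨code, hcm, hceq ▸ hi⟩
  · rintro ⟨code, hm, hi⟩
    have hx : (',' :: ' ' :: code) ∈ pvIndicators.map String.toList := by
      rw [hmap]; exact List.mem_map_of_mem (f := fun c => ',' :: ' ' :: c) hm
    obtain ⟨ind, him, heq⟩ := List.mem_map.1 hx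
    exact ⟨ind, him, heq ▸ hi⟩

-- ===== VERDICT (by name: the statement is the Claim_ definition above) =====
theorem looks_like_location_py_spec : Claim_equal_looks_like_location_py := by
  intro text _
  unfold Spec_looks_like_location_py looks_like_location_py looks_like_location_py_alt
  split
  · rfl
  · rw [Bool.eq_iff_iff, pvAny_iff, pvScan_iff]
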